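-- pv_equiv track=rewrite | github.com/ShepherdCode/ShepherdML | Nasa2021/PyORF.py | find_codons
-- ===== SOURCE A (Python) =====
-- import itertools
--
-- def find_codons(sequence, start_codon = "ATG", stop_codons = ("TAG", "TAA", "TGA")):
--   found_start = []
--   found_stop = []
--   in_sequence = False
--
--   for i in range(len(sequence)):
--     if sequence[i] == start_codon and not in_sequence:
--       found_start.append(i)
--       in_sequence = True
--     if sequence[i] in stop_codons and in_sequence:
--       found_stop.append(i)
--       in_sequence = False
--   found_codons = list(itertools.zip_longest(found_start, found_stop))
--   return found_codons
-- ===== SOURCE B (Python) =====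
-- def find_codons(sequence, start_codon="ATG", stop_codons=("TAG", "TAA", "TGA")):
--     # staged: collect all start/stop indices first, then pair the two sorted
--     # index lists with a two-pointer merge
--     starts = [i for i, c in enumerate(sequence) if c == start_codon]
--     stops = [i for i, c in enumerate(sequence) if c in stop_codons]
--     result = []
--     si = 0
--     ti = 0
--     while si < len(starts):
--         s = starts[si]
--         while ti < len(stops) and stops[ti] < s:
--             ti += 1
--         if ti == len(stops):
--             result.append((s, None))
--             break
--         t = stops[ti]
--         result.append((s, t))
--         ti += 1
--         while si < len(starts) and starts[si] <= t:
--             si += 1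
--     return result
-- ===== Notes on version B (the rewrite author's own statement) =====
-- stated objective: alternative
-- what changed: Replaces A's single state-machine scan (in_sequence boolean, two parallel lists, final itertools.zip_longest) by two staged comprehension passes that collect all start indices and all stop indices, followed by a two-pointer merge of the two sorted index lists that emits the pairs.
import Mathlib
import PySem

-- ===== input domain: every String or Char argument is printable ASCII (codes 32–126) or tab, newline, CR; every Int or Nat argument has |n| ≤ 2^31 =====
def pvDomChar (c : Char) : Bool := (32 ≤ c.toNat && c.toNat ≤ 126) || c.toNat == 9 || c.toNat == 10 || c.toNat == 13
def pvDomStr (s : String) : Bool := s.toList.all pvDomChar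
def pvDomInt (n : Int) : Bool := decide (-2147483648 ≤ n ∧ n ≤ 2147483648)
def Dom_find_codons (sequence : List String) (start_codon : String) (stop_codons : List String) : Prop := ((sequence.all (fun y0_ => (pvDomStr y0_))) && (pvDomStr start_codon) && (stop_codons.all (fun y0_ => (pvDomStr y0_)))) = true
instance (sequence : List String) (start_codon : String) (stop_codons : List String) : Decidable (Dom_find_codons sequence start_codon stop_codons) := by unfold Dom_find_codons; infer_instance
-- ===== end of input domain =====

-- B replaces A's single state-machine scan (in_sequence flag + two parallel lists + zip_longest)
-- by two staged passes collecting all start/stop indices, then a two-pointer merge of the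
-- two sorted index lists; same return value.

-- ===== PORT A =====
-- itertools.zip_longest on two int lists
def zipLongestInt : List Int → List Int → List (Option Int × Option Int)
  | [], [] => []
  | x :: xs, [] => (some x, none) :: zipLongestInt xs []
  | [], y :: ys => (none, some y) :: zipLongestInt [] ys
  | x :: xs, y :: ys => (some x, some y) :: zipLongestInt xs ys

-- one iteration of A's loop body (state: found_start, found_stop, in_sequence)
def stepA (start_codon : String) (stop_codons : List String)
    (acc : List Int × List Int × Bool) (p : Int × String) : List Int × List Int × Bool :=
  let s1 := if p.2 == start_codon && !acc.2.2 then (acc.1 ++ [p.1], acc.2.1, true) else acc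
  if stop_codons.contains p.2 && s1.2.2 then (s1.1, s1.2.1 ++ [p.1], false) else s1

def find_codons (sequence : List String) (start_codon : String) (stop_codons : List String) : List (Option Int × Option Int) :=
  let r := (PySem.List.enumerate sequence 0).foldl (stepA start_codon stop_codons) ([], [], false)
  zipLongestInt r.1 r.2.1

-- ===== PORT B =====
-- the two-pointer merge loop of Source B (pointers rendered as the suffix lists they point at)
def mergeCodons : List Int → List Int → List (Option Int × Option Int)
  | _, [] => []
  | stops, s :: rest =>
    match stops.dropWhile (fun t => decide (t < s)) with
    | [] => [(some s, none)]
    | t :: stops' => (some s, some t) :: mergeCodons stops' (rest.dropWhile (fun x => decide (x ≤ t)))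
termination_by stops starts => starts.length
decreasing_by
  simpa using Nat.lt_succ_of_le (List.length_dropWhile_le _ rest)

def find_codons_alt (sequence : List String) (start_codon : String) (stop_codons : List String) : List (Option Int × Option Int) :=
  let starts := (PySem.List.enumerate sequence 0).filterMap (fun p => if p.2 == start_codon then some p.1 else none)
  let stops := (PySem.List.enumerate sequence 0).filterMap (fun p => if stop_codons.contains p.2 then some p.1 else none)
  mergeCodons stops starts

-- ===== PRECONDITION & SPEC =====
def Spec_find_codons (sequence : List String) (start_codon : String) (stop_codons : List String) (out : List (Option Int × Option Int)) : Prop := out = find_codons_alt sequence start_codon stop_codons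
instance (sequence : List String) (start_codon : String) (stop_codons : List String) (out : List (Option Int × Option Int)) : Decidable (Spec_find_codons sequence start_codon stop_codons out) := by unfold Spec_find_codons; infer_instance

-- ===== CLAIM (what is proved, stated in full; the proofs are below) =====
def Claim_equal_find_codons : Prop := ∀ (sequence : List String) (start_codon : String) (stop_codons : List String), Dom_find_codons sequence start_codon stop_codons → Spec_find_codons sequence start_codon stop_codons (find_codons sequence start_codon stop_codons)

-- ===== LEMMAS AND PROOFS =====

-- common recursive characterization of the result (pending start carried as an Option)
def gRun (sc : String) (st : List String) : Option Int → List (Int × String) → List (Option Int × Option Int)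
  | none, [] => []
  | some s, [] => [(some s, none)]
  | none, (i, c) :: rest =>
      if c == sc then
        if st.contains c then (some i, some i) :: gRun sc st none rest
        else gRun sc st (some i) rest
      else gRun sc st none rest
  | some s, (_j, c) :: rest =>
      if st.contains c then (some s, some _j) :: gRun sc st none rest
      else gRun sc st (some s) rest

def startsOf (sc : String) (l : List (Int × String)) : List Int :=
  l.filterMap (fun p => if p.2 == sc then some p.1 else none)

def stopsOf (st : List String) (l : List (Int × String)) : List Int :=
  l.filterMap (fun p => if st.contains p.2 then some p.1 else none)

-- ---- A side ----

lemma stepA_shift (sc : String) (st : List String) (fs ft : List Int) (ins : Bool) (p : Int × String) :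
    stepA sc st (fs, ft, ins) p =
      (fs ++ (stepA sc st ([], [], ins) p).1, ft ++ (stepA sc st ([], [], ins) p).2.1,
        (stepA sc st ([], [], ins) p).2.2) := by
  simp only [stepA]
  split_ifs <;> simp_all

lemma foldA_shift (sc : String) (st : List String) : ∀ (l : List (Int × String)) (fs ft : List Int) (ins : Bool),
    l.foldl (stepA sc st) (fs, ft, ins) =
      (fs ++ (l.foldl (stepA sc st) ([], [], ins)).1,
       ft ++ (l.foldl (stepA sc st) ([], [], ins)).2.1,
       (l.foldl (stepA sc st) ([], [], ins)).2.2) := by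
  intro l
  induction l with
  | nil => intro fs ft ins; simp
  | cons p rest ih =>
    intro fs ft ins
    simp only [List.foldl_cons]
    rw [stepA_shift sc st fs ft ins p]
    rcases hp : stepA sc st ([], [], ins) p with ⟨a, b, i'⟩
    rw [ih (fs ++ a) (ft ++ b) i', ih a b i']
    simp

lemma A_run (sc : String) (st : List String) : ∀ (l : List (Int × String)),
    (zipLongestInt (l.foldl (stepA sc st) ([], [], false)).1 (l.foldl (stepA sc st) ([], [], false)).2.1
      = gRun sc st none l) ∧
    (∀ s : Int, zipLongestInt (s :: (l.foldl (stepA sc st) ([], [], true)).1) (l.foldl (stepA sc st) ([], [], true)).2.1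
      = gRun sc st (some s) l) := by
  intro l
  induction l with
  | nil => exact ⟨by simp [zipLongestInt, gRun], fun s => by simp [zipLongestInt, gRun]⟩
  | cons p rest ih =>
    obtain ⟨ih0, ih1⟩ := ih
    rcases p with ⟨i, c⟩
    constructor
    · by_cases hsc : c = sc
      · by_cases hst : c ∈ st
        · -- start and stop at the same index
          have hst' : sc ∈ st := hsc ▸ hst
          have hs : stepA sc st ([], [], false) (i, c) = ([i], [i], false) := by
            simp [stepA, hsc, hst']
          simp only [List.foldl_cons, hs]
          rw [foldA_shift sc st rest [i] [i] false]
          rcases hr : rest.foldl (stepA sc st) ([], [], false) with ⟨fs, ft, ins⟩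
          rw [hr] at ih0
          simp only at ih0 ⊢
          simp [zipLongestInt, ih0, gRun, hsc, hst']
        · have hst' : sc ∉ st := hsc ▸ hst
          have hs : stepA sc st ([], [], false) (i, c) = ([i], [], true) := by
            simp [stepA, hsc, hst']
          simp only [List.foldl_cons, hs]
          rw [foldA_shift sc st rest [i] [] true]
          rcases hr : rest.foldl (stepA sc st) ([], [], true) with ⟨fs, ft, ins⟩
          have h1 := ih1 i
          rw [hr] at h1
          simp only at h1
          simp [h1, gRun, hsc, hst']
      · have hs : stepA sc st ([], [], false) (i, c) = ([], [], false) := by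
          simp [stepA, hsc]
        simp only [List.foldl_cons, hs]
        simp [ih0, gRun, hsc]
    · intro s
      by_cases hst : c ∈ st
      · have hs : stepA sc st ([], [], true) (i, c) = ([], [i], false) := by
          simp [stepA, hst]
        simp only [List.foldl_cons, hs]
        rw [foldA_shift sc st rest [] [i] false]
        rcases hr : rest.foldl (stepA sc st) ([], [], false) with ⟨fs, ft, ins⟩
        rw [hr] at ih0
        simp only at ih0 ⊢
        simp [zipLongestInt, ih0, gRun, hst]
      · have hs : stepA sc st ([], [], true) (i, c) = ([], [], true) := by
          simp [stepA, hst]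
        simp only [List.foldl_cons, hs]
        simp [ih1 s, gRun, hst]

-- ---- B side ----

lemma mem_startsOf {sc : String} {l : List (Int × String)} {x : Int} (h : x ∈ startsOf sc l) :
    ∃ p ∈ l, p.1 = x := by
  simp only [startsOf, List.mem_filterMap] at h
  obtain ⟨p, hp, hx⟩ := h
  refine ⟨p, hp, ?_⟩
  by_cases hc : p.2 == sc <;> simp [hc] at hx <;> omega

lemma mem_stopsOf {st : List String} {l : List (Int × String)} {x : Int} (h : x ∈ stopsOf st l) :
    ∃ p ∈ l, p.1 = x := by
  simp only [stopsOf, List.mem_filterMap] at h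
  obtain ⟨p, hp, hx⟩ := h
  refine ⟨p, hp, ?_⟩
  by_cases hc : st.contains p.2 <;> simp [hc] at hx <;> omega

lemma dropWhile_lt_eq_self {s : Int} {l : List Int} (h : ∀ x ∈ l, ¬ x < s) :
    l.dropWhile (fun t => decide (t < s)) = l := by
  cases l with
  | nil => rfl
  | cons a t => simp [List.dropWhile_cons, h a (by simp)]

lemma dropWhile_le_eq_self {s : Int} {l : List Int} (h : ∀ x ∈ l, s < x) :
    l.dropWhile (fun x => decide (x ≤ s)) = l := by
  cases l with
  | nil => rfl
  | cons a t =>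
    have := h a (by simp)
    simp [List.dropWhile_cons]
    omega

-- the state of Source B's merge loop right after a start s has been taken (pending)
def mergeT (sc : String) (st : List String) (s : Int) (l : List (Int × String)) : List (Option Int × Option Int) :=
  match stopsOf st l with
  | [] => [(some s, none)]
  | t :: stops' => (some s, some t) :: mergeCodons stops' ((startsOf sc l).dropWhile (fun x => decide (x ≤ t)))

lemma B_run' (sc : String) (st : List String) : ∀ (l : List (Int × String)),
    l.Pairwise (fun p q => p.1 < q.1) →
    (mergeCodons (stopsOf st l) (startsOf sc l) = gRun sc st none l) ∧
    (∀ s : Int, (∀ p ∈ l, s < p.1) → mergeT sc st s l = gRun sc st (some s) l) := by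
  intro l
  induction l with
  | nil => exact fun _ => ⟨by simp [startsOf, stopsOf, mergeCodons, gRun], fun s _ => by simp [mergeT, startsOf, stopsOf, gRun]⟩
  | cons p rest ih =>
    intro hpw
    have hpw' : rest.Pairwise (fun p q => p.1 < q.1) := hpw.of_cons
    have hlt : ∀ q ∈ rest, p.1 < q.1 := fun q hq => List.rel_of_pairwise_cons hpw hq
    obtain ⟨ih0, ih1⟩ := ih hpw'
    rcases p with ⟨i, c⟩
    simp only at hlt
    have hstarts_gt : ∀ x ∈ startsOf sc rest, i < x := by
      intro x hx; obtain ⟨q, hq, hqx⟩ := mem_startsOf hx; rw [← hqx]; exact hlt q hq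
    have hstops_gt : ∀ x ∈ stopsOf st rest, i < x := by
      intro x hx; obtain ⟨q, hq, hqx⟩ := mem_stopsOf hx; rw [← hqx]; exact hlt q hq
    constructor
    · by_cases hsc : c = sc
      · by_cases hst : c ∈ st
        · -- starts = i :: _, stops = i :: _
          have hst' : sc ∈ st := hsc ▸ hst
          have h1 : startsOf sc ((i, c) :: rest) = i :: startsOf sc rest := by simp [startsOf, hsc]
          have h2 : stopsOf st ((i, c) :: rest) = i :: stopsOf st rest := by simp [stopsOf, hst]
          rw [h1, h2, mergeCodons]
          have hd2 : (startsOf sc rest).dropWhile (fun x => decide (x ≤ i)) = startsOf sc rest :=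
            dropWhile_le_eq_self hstarts_gt
          simp [List.dropWhile_cons, hd2, ih0, gRun, hsc, hst']
        · -- starts = i :: _, stops unchanged
          have hst' : sc ∉ st := hsc ▸ hst
          have h1 : startsOf sc ((i, c) :: rest) = i :: startsOf sc rest := by simp [startsOf, hsc]
          have h2 : stopsOf st ((i, c) :: rest) = stopsOf st rest := by simp [stopsOf, hst]
          rw [h1, h2, mergeCodons]
          have hd : (stopsOf st rest).dropWhile (fun t => decide (t < i)) = stopsOf st rest :=
            dropWhile_lt_eq_self (fun x hx => by have := hstops_gt x hx; omega)
          rw [hd]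
          have hT := ih1 i hlt
          rw [mergeT] at hT
          have hg : gRun sc st none ((i, c) :: rest) = gRun sc st (some i) rest := by
            simp [gRun, hsc, hst']
          rw [hg, ← hT]
      · -- not a start
        have h1 : startsOf sc ((i, c) :: rest) = startsOf sc rest := by simp [startsOf, hsc]
        have hg : gRun sc st none ((i, c) :: rest) = gRun sc st none rest := by
          simp [gRun, hsc]
        rw [h1, hg, ← ih0]
        by_cases hst : c ∈ st
        · have h2 : stopsOf st ((i, c) :: rest) = i :: stopsOf st rest := by simp [stopsOf, hst]
          rw [h2]
          rcases hs' : startsOf sc rest with _ | ⟨s, starts'⟩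
          · simp [mergeCodons]
          · have hi : i < s := hstarts_gt s (by rw [hs']; simp)
            rw [mergeCodons, mergeCodons]
            have : (i :: stopsOf st rest).dropWhile (fun t => decide (t < s)) =
                (stopsOf st rest).dropWhile (fun t => decide (t < s)) := by
              simp [List.dropWhile_cons, hi]
            rw [this]
        · have h2 : stopsOf st ((i, c) :: rest) = stopsOf st rest := by simp [stopsOf, hst]
          rw [h2]
    · intro s hs
      have hsi : s < i := by simpa using hs (i, c) (by simp)
      have hs' : ∀ q ∈ rest, s < q.1 := fun q hq => lt_trans hsi (hlt q hq)
      by_cases hst : c ∈ st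
      · -- first stop found: pair (s, i)
        have h2 : stopsOf st ((i, c) :: rest) = i :: stopsOf st rest := by simp [stopsOf, hst]
        rw [mergeT, h2]
        have hdl : (startsOf sc ((i, c) :: rest)).dropWhile (fun x => decide (x ≤ i)) = startsOf sc rest := by
          by_cases hsc : c = sc
          · have h1 : startsOf sc ((i, c) :: rest) = i :: startsOf sc rest := by simp [startsOf, hsc]
            rw [h1]
            simp only [List.dropWhile_cons]
            simp [dropWhile_le_eq_self hstarts_gt]
          · have h1 : startsOf sc ((i, c) :: rest) = startsOf sc rest := by simp [startsOf, hsc]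
            rw [h1, dropWhile_le_eq_self hstarts_gt]
        simp only [hdl]
        rw [ih0]
        simp [gRun, hst]
      · -- not a stop: pending start survives
        have h2 : stopsOf st ((i, c) :: rest) = stopsOf st rest := by simp [stopsOf, hst]
        have hg : gRun sc st (some s) ((i, c) :: rest) = gRun sc st (some s) rest := by
          simp [gRun, hst]
        rw [hg, ← ih1 s hs']
        rw [mergeT, mergeT, h2]
        rcases hsr : stopsOf st rest with _ | ⟨t, stops'⟩
        · rfl
        · have hit : i < t := by
            have : t ∈ stopsOf st rest := by rw [hsr]; simp
            exact hstops_gt t this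
          by_cases hsc : c = sc
          · have h1 : startsOf sc ((i, c) :: rest) = i :: startsOf sc rest := by simp [startsOf, hsc]
            rw [h1]
            simp [List.dropWhile_cons, le_of_lt hit]
          · have h1 : startsOf sc ((i, c) :: rest) = startsOf sc rest := by simp [startsOf, hsc]
            rw [h1]

-- ===== VERDICT (by name: the statement is the Claim_ definition above) =====
theorem find_codons_spec : Claim_equal_find_codons := by
  intro sequence sc st _
  show find_codons sequence sc st = find_codons_alt sequence sc st
  have hA := (A_run sc st (PySem.List.enumerate sequence 0)).1
  have hB := (B_run' sc st (PySem.List.enumerate sequence 0) (PySem.List.pairwise_lt_enumerate ..)).1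
  unfold find_codons find_codons_alt
  dsimp only
  rw [hA, ← hB]
  rfl
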